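-- pv_equiv track=rewrite | github.com/alexxx-db/dbx-unifiedchat | agent_app/agent_server/multi_agent/agents/chart_generator.py | _pick_date_or_categorical_field
-- ===== SOURCE A (Python) =====
-- from typing import Any, Dict, Iterable, List, Optional, Sequence, Tuple
--
-- def _pick_date_or_categorical_field(
--
--     columns: Sequence[str],
--     kinds: Dict[str, str],
--     exclude: Optional[str] = None,
-- ) -> Optional[str]:
--     for preferred_kind in ("date", "text"):
--         for column in columns:
--             if column == exclude:
--                 continue
--             if kinds.get(column) == preferred_kind:
--                 return column
--     return None
-- ===== SOURCE B (Python) =====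
-- from typing import Dict, Optional, Sequence
--
-- def _pick_date_or_categorical_field(
--     columns: Sequence[str],
--     kinds: Dict[str, str],
--     exclude: Optional[str] = None,
-- ) -> Optional[str]:
--     first_date = None
--     first_text = None
--     for column in columns:
--         if column == exclude:
--             continue
--         kind = kinds.get(column)
--         if kind == "date" and first_date is None:
--             first_date = column
--         elif kind == "text" and first_text is None:
--             first_text = column
--     return first_date if first_date is not None else first_text
-- ===== Notes on version B (the rewrite author's own statement) =====
-- stated objective: alternative
-- what changed: Replaces A's two ordered scans over columns (one per preferred kind) with a single pass that tracks the first non-excluded date column and the first non-excluded text column simultaneously, then prefers the date candidate.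
import Mathlib
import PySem

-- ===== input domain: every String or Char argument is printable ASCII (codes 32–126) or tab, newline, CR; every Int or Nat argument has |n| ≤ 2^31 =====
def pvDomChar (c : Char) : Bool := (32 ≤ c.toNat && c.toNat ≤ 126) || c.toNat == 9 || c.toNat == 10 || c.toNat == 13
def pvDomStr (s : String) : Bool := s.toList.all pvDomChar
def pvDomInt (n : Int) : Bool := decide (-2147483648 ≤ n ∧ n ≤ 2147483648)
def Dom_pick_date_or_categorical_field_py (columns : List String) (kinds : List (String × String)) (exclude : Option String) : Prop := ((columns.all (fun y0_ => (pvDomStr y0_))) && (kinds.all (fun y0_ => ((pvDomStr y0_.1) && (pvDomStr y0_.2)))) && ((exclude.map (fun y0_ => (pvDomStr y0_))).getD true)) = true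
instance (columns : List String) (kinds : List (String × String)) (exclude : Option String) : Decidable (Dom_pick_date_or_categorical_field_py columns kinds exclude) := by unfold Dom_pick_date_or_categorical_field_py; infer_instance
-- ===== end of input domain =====

-- B replaces A's two ordered scans over columns with a single pass tracking both candidate kinds; alternative decomposition, same cost.


-- ===== PORT A =====
-- inner 'for column in columns' loop of A, for one preferred kind
def pickScanA (columns : List String) (kinds : List (String × String)) (exclude : Option String) (preferredKind : String) : Option String :=
  match columns with
  | [] => none
  | column :: rest =>
      if some column == exclude then pickScanA rest kinds exclude preferredKind
      else if (PySem.Dict.mk kinds).get? column == some preferredKind then some column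
      else pickScanA rest kinds exclude preferredKind

def pick_date_or_categorical_field_py (columns : List String) (kinds : List (String × String)) (exclude : Option String) : Option String :=
  match pickScanA columns kinds exclude "date" with
  | some c => some c
  | none =>
      match pickScanA columns kinds exclude "text" with
      | some c => some c
      | none => none

-- ===== PORT B =====
-- single pass maintaining (first_date, first_text)
def pickLoopB (columns : List String) (kinds : List (String × String)) (exclude : Option String) (firstDate firstText : Option String) : Option String × Option String :=
  match columns with
  | [] => (firstDate, firstText)
  | column :: rest =>
      if some column == exclude then pickLoopB rest kinds exclude firstDate firstText
      else
        let kind := (PySem.Dict.mk kinds).get? column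
        if kind == some "date" && firstDate.isNone then
          pickLoopB rest kinds exclude (some column) firstText
        else if kind == some "text" && firstText.isNone then
          pickLoopB rest kinds exclude firstDate (some column)
        else
          pickLoopB rest kinds exclude firstDate firstText

def pick_date_or_categorical_field_py_alt (columns : List String) (kinds : List (String × String)) (exclude : Option String) : Option String :=
  match pickLoopB columns kinds exclude none none with
  | (some d, _) => some d
  | (none, t) => t

-- ===== PRECONDITION & SPEC =====
def Spec_pick_date_or_categorical_field_py (columns : List String) (kinds : List (String × String)) (exclude : Option String) (out : Option String) : Prop := out = pick_date_or_categorical_field_py_alt columns kinds exclude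
instance (columns : List String) (kinds : List (String × String)) (exclude : Option String) (out : Option String) : Decidable (Spec_pick_date_or_categorical_field_py columns kinds exclude out) := by unfold Spec_pick_date_or_categorical_field_py; infer_instance

-- ===== CLAIM (what is proved, stated in full; the proofs are below) =====
def Claim_equal_pick_date_or_categorical_field_py : Prop := ∀ (columns : List String) (kinds : List (String × String)) (exclude : Option String), Dom_pick_date_or_categorical_field_py columns kinds exclude → Spec_pick_date_or_categorical_field_py columns kinds exclude (pick_date_or_categorical_field_py columns kinds exclude)

-- ===== LEMMAS AND PROOFS =====

-- B's loop from state (d, t) returns each original candidate if set, else the first scan hit of that kind.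
theorem pickLoopB_char (columns : List String) (kinds : List (String × String)) (exclude : Option String) (d t : Option String) :
    pickLoopB columns kinds exclude d t =
      (d.or (pickScanA columns kinds exclude "date"), t.or (pickScanA columns kinds exclude "text")) := by
  induction columns generalizing d t with
  | nil => simp [pickLoopB, pickScanA]
  | cons column rest ih =>
      simp only [pickLoopB, pickScanA]
      by_cases hex : some column == exclude
      · simp [hex, ih]
      · simp only [hex]
        by_cases hd : (PySem.Dict.mk kinds).get? column == some "date"
        · have ht : ¬ ((PySem.Dict.mk kinds).get? column == some "text") := by
            intro h
            have := eq_of_beq hd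
            have := eq_of_beq h
            simp_all
          cases d with
          | none => simp [hd, ht, ih]
          | some v => simp [hd, ht, ih]
        · by_cases ht : (PySem.Dict.mk kinds).get? column == some "text"
          · cases t with
            | none => simp [hd, ht, ih]
            | some v => simp [hd, ht, ih]
          · simp [hd, ht, ih]

-- ===== VERDICT (by name: the statement is the Claim_ definition above) =====
theorem pick_date_or_categorical_field_py_spec : Claim_equal_pick_date_or_categorical_field_py := by
  intro columns kinds exclude _
  unfold Spec_pick_date_or_categorical_field_py
  unfold pick_date_or_categorical_field_py pick_date_or_categorical_field_py_alt
  rw [pickLoopB_char]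
  cases hD : pickScanA columns kinds exclude "date" <;>
    cases hT : pickScanA columns kinds exclude "text" <;> simp [Option.or]
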